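-- pv_equiv track=rewrite | github.com/Ruri1212/AtCoder | 1014_JPRS/c.py | can_insert_one_char
-- ===== SOURCE A (Python) =====
-- def can_insert_one_char(T, T_prime):
--     if len(T) != len(T_prime) + 1:
--         return False  # 長さが条件を満たさない場合は不可能
--     i = 0
--     j = 0
--     while i < len(T) and j < len(T_prime):
--         if T[i] != T_prime[j]:
--             if i != j:
--                 return False  # 挿入された文字が見つかりました
--             i += 1
--         else:
--             i += 1
--             j += 1
--     return True
-- ===== SOURCE B (Python) =====
-- def can_insert_one_char(T, T_prime):
--     if len(T) != len(T_prime) + 1: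
--         return False
--     for k in range(len(T_prime)):
--         if T[k] != T_prime[k]:
--             return T[k+1:] == T_prime[k:]
--     return True
-- ===== Notes on version B (the rewrite author's own statement) =====
-- stated objective: simpler
-- what changed: Replaces the stateful two-pointer walk (with the i!=j flag logic) by finding the first mismatch index and directly comparing the remaining suffix slices; no-mismatch means the extra char is at the end.
import Mathlib
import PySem

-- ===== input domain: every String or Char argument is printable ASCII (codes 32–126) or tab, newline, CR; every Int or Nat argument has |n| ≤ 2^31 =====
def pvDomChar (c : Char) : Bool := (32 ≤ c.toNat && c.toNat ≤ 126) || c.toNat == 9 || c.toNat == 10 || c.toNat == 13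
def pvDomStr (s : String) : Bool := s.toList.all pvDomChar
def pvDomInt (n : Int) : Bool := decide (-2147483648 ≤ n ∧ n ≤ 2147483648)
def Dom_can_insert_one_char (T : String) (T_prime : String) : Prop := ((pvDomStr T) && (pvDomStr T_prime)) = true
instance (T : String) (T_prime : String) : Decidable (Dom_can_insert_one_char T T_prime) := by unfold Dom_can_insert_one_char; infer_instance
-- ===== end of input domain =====

-- B replaces A's stateful two-pointer walk by "find first mismatch, then compare the suffixes" (objective: simpler).


-- ===== PORT A =====
-- A's while loop over the two indices i, j; in-range indexing is guaranteed by the loop condition.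
def pvALoop (t tp : List Char) (i j : Nat) : Bool :=
  if _h : i < t.length ∧ j < tp.length then
    if t[i]! ≠ tp[j]! then
      if i ≠ j then false else pvALoop t tp (i + 1) j
    else pvALoop t tp (i + 1) (j + 1)
  else true
termination_by t.length - i
decreasing_by all_goals omega

def can_insert_one_char (T : String) (T_prime : String) : Bool :=
  if T.toList.length ≠ T_prime.toList.length + 1 then false
  else pvALoop T.toList T_prime.toList 0 0

-- ===== PORT B =====
-- B's loop "for k in range(len(T_prime))": structural recursion over the paired suffixes;
-- at the first mismatch, T[k+1:] == T_prime[k:] becomes the list equality `t == b :: tp`.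
def pvBLoop : List Char → List Char → Bool
  | _, [] => true
  | [], _ :: _ => true   -- unreachable under the length guard
  | a :: t, b :: tp => if a ≠ b then t == b :: tp else pvBLoop t tp

def can_insert_one_char_alt (T : String) (T_prime : String) : Bool :=
  if T.toList.length ≠ T_prime.toList.length + 1 then false
  else pvBLoop T.toList T_prime.toList

-- ===== PRECONDITION & SPEC =====
def Spec_can_insert_one_char (T : String) (T_prime : String) (out : Bool) : Prop := out = can_insert_one_char_alt T T_prime
instance (T : String) (T_prime : String) (out : Bool) : Decidable (Spec_can_insert_one_char T T_prime out) := by unfold Spec_can_insert_one_char; infer_instance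

-- ===== CLAIM (what is proved, stated in full; the proofs are below) =====
def Claim_equal_can_insert_one_char : Prop := ∀ (T : String) (T_prime : String), Dom_can_insert_one_char T T_prime → Spec_can_insert_one_char T T_prime (can_insert_one_char T T_prime)

-- ===== LEMMAS AND PROOFS =====

-- After A has skipped the inserted character (i = j+1), its loop is a plain suffix comparison.
theorem pvALoop_shifted (n : Nat) : ∀ (j : Nat) (t tp : List Char),
    t.length = tp.length + 1 → j ≤ tp.length → tp.length - j = n →
    pvALoop t tp (j + 1) j = (t.drop (j + 1) == tp.drop j) := by
  induction n with
  | zero =>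
    intro j t tp hlen hj hn
    have hj' : j = tp.length := by omega
    rw [pvALoop]
    simp [hj', List.drop_eq_nil_of_le, hlen]
  | succ n ih =>
    intro j t tp hlen hj hn
    have hjlt : j < tp.length := by omega
    have hilt : j + 1 < t.length := by omega
    have ht : t.drop (j + 1) = t[j + 1] :: t.drop (j + 2) := List.drop_eq_getElem_cons hilt
    have htp : tp.drop j = tp[j] :: tp.drop (j + 1) := List.drop_eq_getElem_cons hjlt
    rw [pvALoop]
    rw [dif_pos ⟨by omega, hjlt⟩]
    rw [getElem!_pos t (j + 1) hilt, getElem!_pos tp j hjlt]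
    by_cases hc : t[j + 1] = tp[j]
    · rw [if_neg (by simp [hc])]
      rw [ht, htp, List.cons_beq_cons]
      have := ih (j + 1) t tp hlen (by omega) (by omega)
      simp [hc, this]
    · rw [if_pos (by simp [hc])]
      rw [if_pos (by omega)]
      rw [ht, htp, List.cons_beq_cons]
      simp [hc]

-- Before any mismatch (i = j), A's loop computes exactly B's loop on the suffixes.
theorem pvALoop_eq_pvBLoop (n : Nat) : ∀ (j : Nat) (t tp : List Char),
    t.length = tp.length + 1 → j ≤ tp.length → tp.length - j = n →
    pvALoop t tp j j = pvBLoop (t.drop j) (tp.drop j) := by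
  induction n with
  | zero =>
    intro j t tp hlen hj hn
    have hj' : j = tp.length := by omega
    rw [pvALoop]
    simp [pvBLoop, hj']
  | succ n ih =>
    intro j t tp hlen hj hn
    have hjlt : j < tp.length := by omega
    have hilt : j < t.length := by omega
    have ht : t.drop j = t[j] :: t.drop (j + 1) := List.drop_eq_getElem_cons hilt
    have htp : tp.drop j = tp[j] :: tp.drop (j + 1) := List.drop_eq_getElem_cons hjlt
    rw [pvALoop]
    rw [dif_pos ⟨hilt, hjlt⟩]
    rw [getElem!_pos t j hilt, getElem!_pos tp j hjlt]
    by_cases hc : t[j] = tp[j]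
    · rw [if_neg (by simp [hc])]
      rw [ht, htp, pvBLoop]
      have := ih (j + 1) t tp hlen (by omega) (by omega)
      simp [hc, this]
    · rw [if_pos (by simp [hc])]
      rw [if_neg (by omega)]
      rw [ht, htp, pvBLoop]
      rw [if_pos (by simp [hc])]
      rw [pvALoop_shifted (tp.length - j) j t tp hlen (by omega) rfl]
      rw [htp]

-- ===== VERDICT (by name: the statement is the Claim_ definition above) =====
theorem can_insert_one_char_spec : Claim_equal_can_insert_one_char := by
  unfold Claim_equal_can_insert_one_char
  intro T T_prime _
  unfold Spec_can_insert_one_char can_insert_one_char can_insert_one_char_alt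
  by_cases h : T.toList.length = T_prime.toList.length + 1
  · rw [if_neg (by omega), if_neg (by omega)]
    have := pvALoop_eq_pvBLoop T_prime.toList.length 0 T.toList T_prime.toList h (by omega) (by omega)
    simpa using this
  · rw [if_pos h, if_pos h]
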